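-- pv_equiv track=rewrite | github.com/jokob-sk/NetAlertX | test/backend/sql_safe_builder.py | _split_by_logical_operators
-- ===== SOURCE A (Python) =====
-- from typing import Dict, List, Tuple, Any, Optional
--
-- def _split_by_logical_operators(
--     condition: str
-- ) -> List[Tuple[str, Optional[str]]]:
--     """
--     Split a compound condition into individual clauses.
--
--     Returns a list of tuples: (clause_text, logical_operator)
--     The logical operator is the AND/OR that precedes the clause.
--
--     Args:
--         condition: Compound condition string
--
--     Returns:
--         List of (clause_text, logical_op) tuples
--     """
--     clauses = []
--     current_clause = []
--     current_logical_op = None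
--     in_quotes = False
--     i = 0
--
--     while i < len(condition):
--         char = condition[i]
--
--         # Toggle quote state
--         if char == "'":
--             in_quotes = not in_quotes
--             current_clause.append(char)
--             i += 1
--             continue
--
--         # Only look for logical operators outside of quotes
--         if not in_quotes:
--             remaining = condition[i:].upper()
--
--             # Check if we're at a word boundary (start of string or after whitespace)
--             at_word_boundary = i == 0 or condition[i - 1] in " \t"
--
--             # Check for AND (must be at word boundary)
--             if at_word_boundary and (
--                 remaining.startswith("AND ") or remaining.startswith("AND\t")
--             ):
--                 # Save current clause if we have one
--                 if current_clause:
--                     clause_text = "".join(current_clause).strip()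
--                     if clause_text:
--                         clauses.append((clause_text, current_logical_op))
--                     current_clause = []
--
--                 # Set the logical operator for the next clause
--                 current_logical_op = "AND"
--                 i += 3  # Skip 'AND'
--
--                 # Skip whitespace after AND
--                 while i < len(condition) and condition[i] in " \t":
--                     i += 1
--                 continue
--
--             # Check for OR (must be at word boundary)
--             if at_word_boundary and (
--                 remaining.startswith("OR ") or remaining.startswith("OR\t")
--             ):
--                 # Save current clause if we have one
--                 if current_clause:
--                     clause_text = "".join(current_clause).strip()
--                     if clause_text:
--                         clauses.append((clause_text, current_logical_op))
--                     current_clause = []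
--
--                 # Set the logical operator for the next clause
--                 current_logical_op = "OR"
--                 i += 2  # Skip 'OR'
--
--                 # Skip whitespace after OR
--                 while i < len(condition) and condition[i] in " \t":
--                     i += 1
--                 continue
--
--         # Add character to current clause
--         current_clause.append(char)
--         i += 1
--
--     # Don't forget the last clause
--     if current_clause:
--         clause_text = "".join(current_clause).strip()
--         if clause_text:
--             clauses.append((clause_text, current_logical_op))
--
--     return clauses
-- ===== SOURCE B (Python) =====
-- from typing import List, Tuple, Optional
--
--
-- def _split_by_logical_operators(
--     condition: str
-- ) -> List[Tuple[str, Optional[str]]]: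
--     """Index-table version: one scan records (operator, start, end) segment
--     boundaries; a second pass slices the original string, strips, and drops
--     empty clauses.  No character accumulator."""
--     n = len(condition)
--     segments = []  # (op preceding the segment, start index, end index)
--     in_quotes = False
--     prev_ws = True          # at a word boundary (start of string / after whitespace)
--     op = None
--     start = 0
--     i = 0
--     while i < n:
--         c = condition[i]
--         if c == "'":
--             in_quotes = not in_quotes
--             prev_ws = False
--             i += 1
--         elif (not in_quotes and prev_ws
--               and condition[i:i + 3].upper() == "AND"
--               and i + 3 < n and condition[i + 3] in " \t"):
--             segments.append((op, start, i))
--             op = "AND"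
--             i += 3
--             while i < n and condition[i] in " \t":
--                 i += 1
--             start = i
--             prev_ws = True
--         elif (not in_quotes and prev_ws
--               and condition[i:i + 2].upper() == "OR"
--               and i + 2 < n and condition[i + 2] in " \t"):
--             segments.append((op, start, i))
--             op = "OR"
--             i += 2
--             while i < n and condition[i] in " \t":
--                 i += 1
--             start = i
--             prev_ws = True
--         else:
--             prev_ws = c in " \t"
--             i += 1
--     segments.append((op, start, n))
--     return [(condition[s:e].strip(), o)
--             for o, s, e in segments if condition[s:e].strip()]
-- ===== Notes on version B (the rewrite author's own statement) =====
-- stated objective: faster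
-- what changed: A accumulates clause characters one by one and uppercases the whole remaining string at every position; B's scan records only (operator, start, end) index boundaries (uppercasing a 3-char window) and a second pass slices the original string, strips, and drops empty clauses.
import Mathlib
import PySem

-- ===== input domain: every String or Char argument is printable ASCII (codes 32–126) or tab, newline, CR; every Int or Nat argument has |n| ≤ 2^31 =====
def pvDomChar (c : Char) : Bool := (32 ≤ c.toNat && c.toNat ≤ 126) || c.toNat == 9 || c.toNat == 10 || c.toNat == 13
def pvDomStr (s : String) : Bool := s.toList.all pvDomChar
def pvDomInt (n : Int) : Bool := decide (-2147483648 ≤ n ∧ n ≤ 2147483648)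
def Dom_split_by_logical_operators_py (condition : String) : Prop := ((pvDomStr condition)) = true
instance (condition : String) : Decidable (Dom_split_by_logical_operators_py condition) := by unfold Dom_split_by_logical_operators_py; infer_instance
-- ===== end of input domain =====

-- B replaces A's per-character clause accumulator by one scan that only records
-- (operator, start, end) index triples plus a slicing post-pass (objective: alternative decomposition).

-- ===== PORT A =====
-- ' ' / '\t' membership test (Python `in " \t"`)
def pvWs (c : Char) : Bool := c == ' ' || c == '\t'

-- "save current clause if we have one": join, strip, drop if empty
def pvFlush (clauses : List (String × Option String)) (curr : List Char)
    (op : Option String) : List (String × Option String) :=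
  if curr ≠ [] then
    let t := PySem.Chars.strip curr
    if t ≠ [] then clauses ++ [(String.mk t, op)] else clauses
  else clauses

-- A's while-loop; the index/look-back pair (i, condition[i-1]) is carried as the
-- remaining suffix plus `prevWs` (true at i = 0 and whenever condition[i-1] ∈ " \t";
-- after an operator the skipped whitespace makes the boundary true); the inner
-- whitespace-skipping while-loop is the dropWhile.
def pvALoop (rem : List Char) (clauses : List (String × Option String))
    (curr : List Char) (op : Option String) (inq prevWs : Bool) :
    List (String × Option String) :=
  match rem with
  | [] => pvFlush clauses curr op
  | c :: rest =>
    if c == '\'' then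
      pvALoop rest clauses (curr ++ [c]) op (!inq) false
    else if !inq && prevWs &&
        (PySem.Chars.startswith (PySem.Chars.upper (c :: rest)) "AND ".toList ||
         PySem.Chars.startswith (PySem.Chars.upper (c :: rest)) "AND\t".toList) then
      pvALoop (((c :: rest).drop 3).dropWhile pvWs) (pvFlush clauses curr op) [] (some "AND") inq true
    else if !inq && prevWs &&
        (PySem.Chars.startswith (PySem.Chars.upper (c :: rest)) "OR ".toList ||
         PySem.Chars.startswith (PySem.Chars.upper (c :: rest)) "OR\t".toList) then
      pvALoop (((c :: rest).drop 2).dropWhile pvWs) (pvFlush clauses curr op) [] (some "OR") inq true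
    else
      pvALoop rest clauses (curr ++ [c]) op inq (pvWs c)
  termination_by rem.length
  decreasing_by
    all_goals
      first
      | (have h1 := List.length_dropWhile_le pvWs ((c :: rest).drop 3)
         simp at h1 ⊢; omega)
      | (have h1 := List.length_dropWhile_le pvWs ((c :: rest).drop 2)
         simp at h1 ⊢; omega)
      | (simp; done)
      | (simp; omega)

def split_by_logical_operators_py (condition : String) : List (String × Option String) :=
  pvALoop condition.toList [] [] none false true

-- ===== PORT B =====
-- B's scan: same quote/boundary tracking, but records (op, start, end) index
-- triples instead of accumulating characters.
def pvBScan (rem : List Char) (i : Nat) (inq prevWs : Bool) (op : Option String)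
    (start : Nat) (acc : List (Option String × Nat × Nat)) :
    List (Option String × Nat × Nat) :=
  match rem with
  | [] => acc ++ [(op, start, i)]
  | c :: rest =>
    if c == '\'' then
      pvBScan rest (i + 1) (!inq) false op start acc
    else if !inq && prevWs && (PySem.Chars.upper ((c :: rest).take 3) == "AND".toList) &&
        (match (c :: rest).drop 3 with | w :: _ => pvWs w | [] => false) then
      pvBScan (((c :: rest).drop 3).dropWhile pvWs)
        (i + 3 + (((c :: rest).drop 3).takeWhile pvWs).length) inq true (some "AND")
        (i + 3 + (((c :: rest).drop 3).takeWhile pvWs).length) (acc ++ [(op, start, i)])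
    else if !inq && prevWs && (PySem.Chars.upper ((c :: rest).take 2) == "OR".toList) &&
        (match (c :: rest).drop 2 with | w :: _ => pvWs w | [] => false) then
      pvBScan (((c :: rest).drop 2).dropWhile pvWs)
        (i + 2 + (((c :: rest).drop 2).takeWhile pvWs).length) inq true (some "OR")
        (i + 2 + (((c :: rest).drop 2).takeWhile pvWs).length) (acc ++ [(op, start, i)])
    else
      pvBScan rest (i + 1) inq (pvWs c) op start acc
  termination_by rem.length
  decreasing_by
    all_goals
      first
      | (have h1 := List.length_dropWhile_le pvWs ((c :: rest).drop 3)
         simp at h1 ⊢; omega)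
      | (have h1 := List.length_dropWhile_le pvWs ((c :: rest).drop 2)
         simp at h1 ⊢; omega)
      | (simp; done)
      | (simp; omega)

-- condition[s:e].strip() for 0 ≤ s ≤ e: Python's slice with non-negative bounds
-- is exactly drop-then-take; the clause is dropped when it strips to empty.
def pvClause (cs : List Char) (t : Option String × Nat × Nat) :
    Option (String × Option String) :=
  let txt := PySem.Chars.strip ((cs.drop t.2.1).take (t.2.2 - t.2.1))
  if txt ≠ [] then some (String.mk txt, t.1) else none

def split_by_logical_operators_py_alt (condition : String) : List (String × Option String) :=
  (pvBScan condition.toList 0 false true none 0 []).filterMap (pvClause condition.toList)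

-- ===== PRECONDITION & SPEC =====
def Spec_split_by_logical_operators_py (condition : String) (out : List (String × Option String)) : Prop := out = split_by_logical_operators_py_alt condition
instance (condition : String) (out : List (String × Option String)) : Decidable (Spec_split_by_logical_operators_py condition out) := by unfold Spec_split_by_logical_operators_py; infer_instance

-- ===== CLAIM (what is proved, stated in full; the proofs are below) =====
def Claim_equal_split_by_logical_operators_py : Prop := ∀ (condition : String), Dom_split_by_logical_operators_py condition → Spec_split_by_logical_operators_py condition (split_by_logical_operators_py condition)

-- ===== LEMMAS AND PROOFS =====

-- upperChar maps nothing onto a char below 'A' (code 65), so comparing the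
-- uppercased text with ' ' or '\t' is comparing the original char.
lemma pvUpperChar_low (c d : Char) (hd : d.toNat < 65) :
    (PySem.Chars.upperChar c = d) ↔ (c = d) := by
  unfold PySem.Chars.upperChar
  split
  case isTrue h =>
    have hc : 97 ≤ c.toNat ∧ c.toNat ≤ 122 := by
      simp [PySem.Chars.islower, Char.le_def] at h
      exact ⟨h.1, h.2⟩
    constructor
    · intro he
      exfalso
      have h2 := congrArg Char.toNat he
      rw [Char.toNat_ofNat, if_pos (Or.inl (by omega))] at h2
      omega
    · intro he
      exfalso
      subst he
      omega
  case isFalse => exact Iff.rfl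

lemma pvBeq_upper_low (e d : Char) (hd : d.toNat < 65) :
    (d == PySem.Chars.upperChar e) = (e == d) := by
  by_cases h : e = d
  · subst h
    have h1 : PySem.Chars.upperChar e = e := (pvUpperChar_low e e hd).2 rfl
    simp [h1]
  · have h1 : ¬ (PySem.Chars.upperChar e = d) := fun hh => h ((pvUpperChar_low e d hd).1 hh)
    rw [Bool.eq_iff_iff]
    simp only [beq_iff_eq]
    constructor
    · intro hh
      exact absurd hh.symm h1
    · intro hh
      exact absurd hh h

lemma pvBeqComm (a b : Char) : (a == b) = (b == a) := by
  rw [Bool.eq_iff_iff]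
  simp only [beq_iff_eq]
  exact eq_comm

lemma pvBoolDistrib4 (a b c d e : Bool) :
    (a && (b && (c && d)) || a && (b && (c && e))) = (a && (b && c) && (d || e)) := by
  cases a <;> cases b <;> cases c <;> cases d <;> cases e <;> rfl

lemma pvBoolDistrib3 (a b d e : Bool) :
    (a && (b && d) || a && (b && e)) = (a && b && (d || e)) := by
  cases a <;> cases b <;> cases d <;> cases e <;> rfl

lemma pvBeqConsChar (x a : Char) (xs as : List Char) :
    ((x :: xs) == (a :: as)) = (x == a && (xs == as)) := rfl

lemma pvBeqNilChar : (([] : List Char) == ([] : List Char)) = true := rfl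

lemma pvDropWhile_eq_drop (l : List Char) (p : Char → Bool) :
    l.dropWhile p = l.drop (l.takeWhile p).length := by
  induction l with
  | nil => simp
  | cons a t ih => by_cases h : p a <;> simp [h, ih]

-- A's guard (startswith "AND "/"AND\t" on the uppercased remaining string)
-- coincides with B's guard (uppercased 3-char window + whitespace next char).
lemma pvGuardAND (c : Char) (rest : List Char) :
    (PySem.Chars.startswith (PySem.Chars.upper (c :: rest)) "AND ".toList ||
     PySem.Chars.startswith (PySem.Chars.upper (c :: rest)) "AND\t".toList)
    = ((PySem.Chars.upper ((c :: rest).take 3) == "AND".toList) &&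
       (match (c :: rest).drop 3 with | w :: _ => pvWs w | [] => false)) := by
  have e1 : "AND ".toList = ['A', 'N', 'D', ' '] := rfl
  have e2 : "AND\t".toList = ['A', 'N', 'D', '\t'] := rfl
  have e3 : "AND".toList = ['A', 'N', 'D'] := rfl
  match rest with
  | [] =>
    simp [PySem.Chars.startswith, PySem.Chars.upper, e1, e2, List.isPrefixOf]
  | [b] =>
    simp [PySem.Chars.startswith, PySem.Chars.upper, e1, e2, List.isPrefixOf]
  | [b, d] =>
    simp [PySem.Chars.startswith, PySem.Chars.upper, e1, e2, List.isPrefixOf]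
  | b :: d :: e :: t =>
    simp only [PySem.Chars.startswith, PySem.Chars.upper, e1, e2, e3, List.map_cons,
      List.take, List.drop, List.isPrefixOf, pvWs]
    rw [pvBeq_upper_low e ' ' (by decide), pvBeq_upper_low e '\t' (by decide),
      pvBeqComm 'A' (PySem.Chars.upperChar c), pvBeqComm 'N' (PySem.Chars.upperChar b),
      pvBeqComm 'D' (PySem.Chars.upperChar d)]
    simp only [List.map_nil, pvBeqConsChar, pvBeqNilChar, Bool.and_true]
    exact pvBoolDistrib4 _ _ _ _ _

lemma pvGuardOR (c : Char) (rest : List Char) :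
    (PySem.Chars.startswith (PySem.Chars.upper (c :: rest)) "OR ".toList ||
     PySem.Chars.startswith (PySem.Chars.upper (c :: rest)) "OR\t".toList)
    = ((PySem.Chars.upper ((c :: rest).take 2) == "OR".toList) &&
       (match (c :: rest).drop 2 with | w :: _ => pvWs w | [] => false)) := by
  have e1 : "OR ".toList = ['O', 'R', ' '] := rfl
  have e2 : "OR\t".toList = ['O', 'R', '\t'] := rfl
  have e3 : "OR".toList = ['O', 'R'] := rfl
  match rest with
  | [] =>
    simp [PySem.Chars.startswith, PySem.Chars.upper, e1, e2, List.isPrefixOf]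
  | [b] =>
    simp [PySem.Chars.startswith, PySem.Chars.upper, e1, e2, List.isPrefixOf]
  | b :: e :: t =>
    simp only [PySem.Chars.startswith, PySem.Chars.upper, e1, e2, e3, List.map_cons,
      List.take, List.drop, List.isPrefixOf, pvWs]
    rw [pvBeq_upper_low e ' ' (by decide), pvBeq_upper_low e '\t' (by decide),
      pvBeqComm 'O' (PySem.Chars.upperChar c), pvBeqComm 'R' (PySem.Chars.upperChar b)]
    simp only [List.map_nil, pvBeqConsChar, pvBeqNilChar, Bool.and_true]
    exact pvBoolDistrib3 _ _ _ _

-- flushing the accumulated clause = post-processing the recorded segment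
lemma pvFlush_eq (cs : List Char) (start i : Nat)
    (clauses : List (String × Option String)) (op : Option String) :
    pvFlush clauses ((cs.drop start).take (i - start)) op
      = clauses ++ (pvClause cs (op, start, i)).toList := by
  unfold pvFlush pvClause
  by_cases h : (cs.drop start).take (i - start) = []
  · simp [h, PySem.Chars.strip, PySem.Chars.lstrip, PySem.Chars.rstrip]
  · by_cases h2 : PySem.Chars.strip ((cs.drop start).take (i - start)) = [] <;> simp [h, h2]

-- appending the character at index i extends the slice by one
lemma pvTake_ext (cs : List Char) (start i : Nat) (c : Char)
    (hsi : start ≤ i) (hc : cs[i]? = some c) :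
    (cs.drop start).take (i - start) ++ [c] = (cs.drop start).take (i + 1 - start) := by
  have h1 : i + 1 - start = (i - start) + 1 := by omega
  have h2 : (cs.drop start)[i - start]? = some c := by
    rw [List.getElem?_drop]
    have h3 : start + (i - start) = i := by omega
    rw [h3, hc]
  rw [h1, List.take_add_one, h2]
  rfl

-- the main invariant: A's loop state (clauses, accumulated chars) is the
-- post-processed image of B's state (segment table, start index)
lemma pvMain (n : Nat) (cs rem : List Char) (i start : Nat) (inq prevWs : Bool)
    (op : Option String) (acc : List (Option String × Nat × Nat))
    (hlen : rem.length = n) (hrem : rem = cs.drop i) (hsi : start ≤ i) :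
    pvALoop rem (acc.filterMap (pvClause cs)) ((cs.drop start).take (i - start)) op inq prevWs
      = (pvBScan rem i inq prevWs op start acc).filterMap (pvClause cs) := by
  induction n using Nat.strong_induction_on generalizing rem i start inq prevWs op acc with
  | _ n ih =>
  cases rem with
  | nil =>
    rw [pvALoop, pvBScan, List.filterMap_append, pvFlush_eq]
    cases h : pvClause cs (op, start, i) <;> simp [List.filterMap_cons, h]
  | cons c rest =>
    have hi : i < cs.length := by
      by_contra h
      rw [List.drop_eq_nil_of_le (by omega)] at hrem
      simp at hrem
    have hrest : rest = cs.drop (i + 1) := by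
      have h4 := congrArg List.tail hrem
      simpa [List.tail_drop] using h4
    have hc : cs[i]? = some c := by
      have h0 : (cs.drop i)[0]? = some c := by rw [← hrem]; rfl
      rw [List.getElem?_drop] at h0
      simpa using h0
    have hEqAnd : (!inq && prevWs &&
        (PySem.Chars.startswith (PySem.Chars.upper (c :: rest)) "AND ".toList ||
         PySem.Chars.startswith (PySem.Chars.upper (c :: rest)) "AND\t".toList))
        = (!inq && prevWs && (PySem.Chars.upper ((c :: rest).take 3) == "AND".toList) &&
           (match (c :: rest).drop 3 with | w :: _ => pvWs w | [] => false)) := by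
      rw [pvGuardAND, ← Bool.and_assoc]
    have hEqOr : (!inq && prevWs &&
        (PySem.Chars.startswith (PySem.Chars.upper (c :: rest)) "OR ".toList ||
         PySem.Chars.startswith (PySem.Chars.upper (c :: rest)) "OR\t".toList))
        = (!inq && prevWs && (PySem.Chars.upper ((c :: rest).take 2) == "OR".toList) &&
           (match (c :: rest).drop 2 with | w :: _ => pvWs w | [] => false)) := by
      rw [pvGuardOR, ← Bool.and_assoc]
    rw [pvALoop, pvBScan]
    by_cases hq : c == '\''
    · rw [if_pos hq, if_pos hq, pvTake_ext cs start i c hsi hc]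
      exact ih rest.length (by simp [← hlen]) rest (i + 1) start (!inq) false op acc rfl hrest (by omega)
    · rw [if_neg hq, if_neg hq]
      by_cases hAndB : (!inq && prevWs && (PySem.Chars.upper ((c :: rest).take 3) == "AND".toList) &&
          (match (c :: rest).drop 3 with | w :: _ => pvWs w | [] => false)) = true
      · have hAndA : (!inq && prevWs &&
            (PySem.Chars.startswith (PySem.Chars.upper (c :: rest)) "AND ".toList ||
             PySem.Chars.startswith (PySem.Chars.upper (c :: rest)) "AND\t".toList)) = true := by
          rw [hEqAnd]
          exact hAndB
        rw [if_pos hAndA, if_pos hAndB]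
        have htail : (c :: rest).drop 3 = cs.drop (i + 3) := by
          have h5 : (c :: rest).drop 3 = (cs.drop i).drop 3 := by rw [hrem]
          rw [h5, List.drop_drop]
        set k := (((c :: rest).drop 3).takeWhile pvWs).length with hk
        have hdrop : ((c :: rest).drop 3).dropWhile pvWs = cs.drop (i + 3 + k) := by
          rw [pvDropWhile_eq_drop, ← hk, htail, List.drop_drop]
        have hlt : (((c :: rest).drop 3).dropWhile pvWs).length < n := by
          have h1 := List.length_dropWhile_le pvWs ((c :: rest).drop 3)
          have h2 : ((c :: rest).drop 3).length ≤ rest.length := by simp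
          have h3 : (c :: rest).length = rest.length + 1 := by simp
          omega
        have h6 := ih (((c :: rest).drop 3).dropWhile pvWs).length hlt
          (((c :: rest).drop 3).dropWhile pvWs) (i + 3 + k) (i + 3 + k) inq true
          (some "AND") (acc ++ [(op, start, i)]) rfl hdrop (by omega)
        have h7 : List.filterMap (pvClause cs) (acc ++ [(op, start, i)])
            = List.filterMap (pvClause cs) acc ++ (pvClause cs (op, start, i)).toList := by
          rw [List.filterMap_append]
          cases h : pvClause cs (op, start, i) <;> simp [List.filterMap_cons, h]
        rw [h7] at h6
        rw [pvFlush_eq]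
        simpa using h6
      · have hAndA : ¬ ((!inq && prevWs &&
            (PySem.Chars.startswith (PySem.Chars.upper (c :: rest)) "AND ".toList ||
             PySem.Chars.startswith (PySem.Chars.upper (c :: rest)) "AND\t".toList)) = true) := by
          rw [hEqAnd]
          exact hAndB
        rw [if_neg hAndA, if_neg hAndB]
        by_cases hOrB : (!inq && prevWs && (PySem.Chars.upper ((c :: rest).take 2) == "OR".toList) &&
            (match (c :: rest).drop 2 with | w :: _ => pvWs w | [] => false)) = true
        · have hOrA : (!inq && prevWs &&
              (PySem.Chars.startswith (PySem.Chars.upper (c :: rest)) "OR ".toList ||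
               PySem.Chars.startswith (PySem.Chars.upper (c :: rest)) "OR\t".toList)) = true := by
            rw [hEqOr]
            exact hOrB
          rw [if_pos hOrA, if_pos hOrB]
          have htail : (c :: rest).drop 2 = cs.drop (i + 2) := by
            have h5 : (c :: rest).drop 2 = (cs.drop i).drop 2 := by rw [hrem]
            rw [h5, List.drop_drop]
          set k := (((c :: rest).drop 2).takeWhile pvWs).length with hk
          have hdrop : ((c :: rest).drop 2).dropWhile pvWs = cs.drop (i + 2 + k) := by
            rw [pvDropWhile_eq_drop, ← hk, htail, List.drop_drop]
          have hlt : (((c :: rest).drop 2).dropWhile pvWs).length < n := by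
            have h1 := List.length_dropWhile_le pvWs ((c :: rest).drop 2)
            have h2 : ((c :: rest).drop 2).length ≤ rest.length := by simp
            have h3 : (c :: rest).length = rest.length + 1 := by simp
            omega
          have h6 := ih (((c :: rest).drop 2).dropWhile pvWs).length hlt
            (((c :: rest).drop 2).dropWhile pvWs) (i + 2 + k) (i + 2 + k) inq true
            (some "OR") (acc ++ [(op, start, i)]) rfl hdrop (by omega)
          have h7 : List.filterMap (pvClause cs) (acc ++ [(op, start, i)])
              = List.filterMap (pvClause cs) acc ++ (pvClause cs (op, start, i)).toList := by
            rw [List.filterMap_append]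
            cases h : pvClause cs (op, start, i) <;> simp [List.filterMap_cons, h]
          rw [h7] at h6
          rw [pvFlush_eq]
          simpa using h6
        · have hOrA : ¬ ((!inq && prevWs &&
              (PySem.Chars.startswith (PySem.Chars.upper (c :: rest)) "OR ".toList ||
               PySem.Chars.startswith (PySem.Chars.upper (c :: rest)) "OR\t".toList)) = true) := by
            rw [hEqOr]
            exact hOrB
          rw [if_neg hOrA, if_neg hOrB, pvTake_ext cs start i c hsi hc]
          exact ih rest.length (by simp [← hlen]) rest (i + 1) start inq (pvWs c) op acc rfl hrest (by omega)

-- ===== VERDICT (by name: the statement is the Claim_ definition above) =====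
theorem split_by_logical_operators_py_spec : Claim_equal_split_by_logical_operators_py := by
  intro condition _
  unfold Spec_split_by_logical_operators_py split_by_logical_operators_py split_by_logical_operators_py_alt
  have h := pvMain condition.toList.length condition.toList condition.toList 0 0 false true none []
    rfl rfl (by omega)
  simpa using h
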